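-- pv_equiv track=rewrite | github.com/JakeRoggenbuck/T3-Paper-Code | t3_2_permutations.py | remove_more_than_two_in_a_row_t
-- ===== SOURCE A (Python) =====
-- def remove_more_than_two_in_a_row_t(items: list[str]):
--     left = []
--     for item in items:
--         ones = 0
--         zeros = 0
--
--         failed = False
--
--         for x in item:
--
--             if x == '0':
--                 zeros += 1
--                 ones = 0
--             elif x == '1':
--                 ones += 1
--                 zeros = 0
--
--             if ones == 3:
--                 ones = 0
--                 failed = True
--
--             if zeros == 3:
--                 zeros = 0
--                 failed = True
--
--         if not failed:
--             left.append(item)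
--
--     return left
-- ===== SOURCE B (Python) =====
-- def remove_more_than_two_in_a_row_t(items: list[str]):
--     def ok(item):
--         s = ''.join(c for c in item if c in '01')
--         return '000' not in s and '111' not in s
--     return [item for item in items if ok(item)]
-- ===== Notes on version B (the rewrite author's own statement) =====
-- stated objective: simpler
-- what changed: Replaces the per-character running-counter state machine with a filter to '0'/'1' characters followed by two substring-containment checks ('000'/'111'), and the explicit accumulator loop with a list comprehension.
import Mathlib
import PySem

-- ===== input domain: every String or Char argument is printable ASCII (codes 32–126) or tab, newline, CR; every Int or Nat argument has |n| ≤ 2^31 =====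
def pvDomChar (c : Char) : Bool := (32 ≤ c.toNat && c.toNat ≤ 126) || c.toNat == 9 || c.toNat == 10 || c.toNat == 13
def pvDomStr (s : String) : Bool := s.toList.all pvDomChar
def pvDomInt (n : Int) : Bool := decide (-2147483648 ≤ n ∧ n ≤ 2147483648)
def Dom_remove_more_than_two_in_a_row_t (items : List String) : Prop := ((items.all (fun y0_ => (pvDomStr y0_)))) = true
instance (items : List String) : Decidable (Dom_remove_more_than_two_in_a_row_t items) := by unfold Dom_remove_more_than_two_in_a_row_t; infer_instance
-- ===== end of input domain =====

-- B replaces A's per-character running-counter state machine by a filter to '0'/'1'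
-- characters followed by two substring ('000'/'111') checks; return value proved equal.

-- ===== PORT A =====
-- inner 'for x in item' loop: state (ones, zeros, failed), branches in A's order
def pvLoopA : List Char → Int → Int → Bool → Bool
  | [], _, _, failed => failed
  | x :: xs, ones, zeros, failed =>
    let ones1 := if x == '0' then 0 else if x == '1' then ones + 1 else ones
    let zeros1 := if x == '0' then zeros + 1 else if x == '1' then 0 else zeros
    let ones2 := if ones1 == 3 then 0 else ones1
    let failed1 := if ones1 == 3 then true else failed
    let zeros2 := if zeros1 == 3 then 0 else zeros1
    let failed2 := if zeros1 == 3 then true else failed1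
    pvLoopA xs ones2 zeros2 failed2

def remove_more_than_two_in_a_row_t (items : List String) : List String :=
  items.foldl (fun left item =>
    if pvLoopA item.toList 0 0 false then left else left ++ [item]) []

-- ===== PORT B =====
-- '000' in s / '111' in s on the filtered list: window check sliding by one (hand port, exact)
def pvHasTriple (c : Char) : List Char → Bool
  | a :: b :: d :: rest => (a == c && b == c && d == c) || pvHasTriple c (b :: d :: rest)
  | _ => false

def pvOkB (item : String) : Bool :=
  let s := item.toList.filter (fun ch => ch == '0' || ch == '1')
  !(pvHasTriple '0' s || pvHasTriple '1' s)

def remove_more_than_two_in_a_row_t_alt (items : List String) : List String :=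
  items.filter pvOkB

-- ===== PRECONDITION & SPEC =====
def Spec_remove_more_than_two_in_a_row_t (items : List String) (out : List String) : Prop := out = remove_more_than_two_in_a_row_t_alt items
instance (items : List String) (out : List String) : Decidable (Spec_remove_more_than_two_in_a_row_t items out) := by unfold Spec_remove_more_than_two_in_a_row_t; infer_instance

-- ===== CLAIM (what is proved, stated in full; the proofs are below) =====
def Claim_equal_remove_more_than_two_in_a_row_t : Prop := ∀ (items : List String), Dom_remove_more_than_two_in_a_row_t items → Spec_remove_more_than_two_in_a_row_t items (remove_more_than_two_in_a_row_t items)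

-- ===== LEMMAS AND PROOFS =====

-- once failed, A's loop stays failed
lemma pvLoopA_true (cs : List Char) : ∀ o z : Int, pvLoopA cs o z true = true := by
  induction cs with
  | nil => intro o z; rfl
  | cons x xs ih =>
    intro o z
    simp only [pvLoopA]
    split_ifs <;> simp [ih]

lemma pvHasTriple_cons_ne (c a : Char) (h : (a == c) = false) (l : List Char) :
    pvHasTriple c (a :: l) = pvHasTriple c l := by
  match l with
  | [] => rfl
  | [b] => rfl
  | b :: d :: r => simp [pvHasTriple, h]

-- up to two c's followed by a non-c break no window
lemma pvHasTriple_pad_break (c a : Char) (h : (a == c) = false) (n : Nat) (hn : n ≤ 2)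
    (l : List Char) : pvHasTriple c (List.replicate n c ++ a :: l) = pvHasTriple c l := by
  have h' : ¬ a = c := by simpa using h
  interval_cases n
  · exact pvHasTriple_cons_ne c a h l
  · match l with
    | [] => simp [pvHasTriple, h]
    | [b] => simp [pvHasTriple, h] <;> exact h'
    | b :: d :: r => simp [pvHasTriple, h] <;> exact h'
  · match l with
    | [] => simp [pvHasTriple, h]
    | [b] => simp [pvHasTriple, h] <;> exact h'
    | b :: d :: r => simp [pvHasTriple, h] <;> exact h'

lemma pvHasTriple_replicate (c : Char) (n : Nat) (hn : n ≤ 2) :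
    pvHasTriple c (List.replicate n c) = false := by
  interval_cases n <;> rfl

-- main invariant: A's loop from counters (o, z) = triple check on padded filtered list
lemma pvLoop_eq_triple (cs : List Char) : ∀ o z : Int, 0 ≤ o → o ≤ 2 → 0 ≤ z → z ≤ 2 →
    pvLoopA cs o z false =
      (pvHasTriple '0' (List.replicate z.toNat '0' ++ cs.filter (fun ch => ch == '0' || ch == '1')) ||
       pvHasTriple '1' (List.replicate o.toNat '1' ++ cs.filter (fun ch => ch == '0' || ch == '1'))) := by
  induction cs with
  | nil =>
    intro o z ho1 ho2 hz1 hz2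
    simp [pvLoopA, pvHasTriple_replicate '0' z.toNat (by omega),
      pvHasTriple_replicate '1' o.toNat (by omega)]
  | cons x xs ih =>
    intro o z ho1 ho2 hz1 hz2
    by_cases h0 : x = '0'
    · subst h0
      simp only [pvLoopA, List.filter_cons]
      norm_num
      by_cases hz3 : z + 1 = 3
      · have hz : z = 2 := by omega
        subst hz
        norm_num
        rw [pvLoopA_true]
        simp [pvHasTriple]
      · rw [decide_eq_false hz3, if_neg hz3]
        rw [ih 0 (z + 1) le_rfl (by omega) (by omega) (by omega)]
        have hrep : List.replicate (z + 1).toNat '0' = List.replicate z.toNat '0' ++ ['0'] := by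
          have h : (z + 1).toNat = z.toNat + 1 := by omega
          rw [h, List.replicate_succ']
        rw [hrep]
        simp only [List.append_assoc, List.singleton_append, List.replicate_zero,
          List.nil_append]
        rw [pvHasTriple_pad_break '1' '0' (by decide) o.toNat (by omega)]
        simp
    · by_cases h1 : x = '1'
      · subst h1
        simp only [pvLoopA, List.filter_cons]
        simp
        by_cases ho3 : o + 1 = 3
        · have ho : o = 2 := by omega
          subst ho
          norm_num
          rw [pvLoopA_true]
          simp [pvHasTriple]
        · rw [decide_eq_false ho3, if_neg ho3]
          rw [ih (o + 1) 0 (by omega) (by omega) le_rfl (by omega)]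
          have hrep : List.replicate (o + 1).toNat '1' = List.replicate o.toNat '1' ++ ['1'] := by
            have h : (o + 1).toNat = o.toNat + 1 := by omega
            rw [h, List.replicate_succ']
          rw [hrep]
          simp only [List.append_assoc, List.singleton_append, List.replicate_zero,
            List.nil_append]
          rw [pvHasTriple_pad_break '0' '1' (by decide) z.toNat (by omega)]
          simp
      · -- transparent character: counters unchanged, char dropped by the filter
        have ho3 : ¬(o = 3) := by omega
        have hz3 : ¬(z = 3) := by omega
        simp only [pvLoopA, List.filter_cons, beq_iff_eq, h0, h1, if_false,
          if_neg ho3, if_neg hz3]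
        norm_num [h0, h1]
        exact ih o z ho1 ho2 hz1 hz2

-- per-item agreement
lemma pvItem_eq (item : String) :
    (if pvLoopA item.toList 0 0 false then false else true) = pvOkB item := by
  rw [pvLoop_eq_triple item.toList 0 0 le_rfl (by omega) le_rfl (by omega)]
  simp [pvOkB, Bool.or_comm]

-- ===== VERDICT (by name: the statement is the Claim_ definition above) =====
theorem remove_more_than_two_in_a_row_t_spec : Claim_equal_remove_more_than_two_in_a_row_t := by
  intro items _
  show _ = _
  unfold remove_more_than_two_in_a_row_t remove_more_than_two_in_a_row_t_alt
  rw [show (fun left item =>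
      if pvLoopA item.toList 0 0 false then left else left ++ [item]) =
      (fun (left : List String) item => if pvOkB item then left ++ [item] else left) from ?_,
    PySem.List.foldl_append_if_eq_filter, List.nil_append]
  funext left item
  rw [← pvItem_eq item]
  by_cases h : pvLoopA item.toList 0 0 false <;> simp [h]
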